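-- pv_equiv track=rewrite | github.com/autowarefoundation/autoware_system_designer | tools/topology-analyzer/ros2_graph_snapshot.py | _parse_ros_remappings
-- ===== SOURCE A (Python) =====
-- from typing import Dict, List, Optional, Set, Tuple
--
-- def _parse_ros_remappings(cmdline: List[str]) -> Tuple[Optional[str], Optional[str]]:
--     """
--     Walk --ros-args tokens and return (node_name, namespace) from
--     ``-r __node:=<name>`` / ``-r __ns:=<ns>`` remapping rules.
--     """
--     node_name: Optional[str] = None
--     namespace: Optional[str] = None
--     i = 0
--     while i < len(cmdline):
--         arg = cmdline[i]
--         if arg in ("-r", "--remap") and i + 1 < len(cmdline):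
--             remap = cmdline[i + 1]
--             i += 2
--             if remap.startswith("__node:="):
--                 node_name = remap[len("__node:="):]
--             elif remap.startswith("__ns:="):
--                 namespace = remap[len("__ns:="):]
--         else:
--             i += 1
--     return node_name, namespace
-- ===== SOURCE B (Python) =====
-- from typing import List, Optional, Tuple
--
-- def _parse_ros_remappings(cmdline: List[str]) -> Tuple[Optional[str], Optional[str]]:
--     """Collect the value token of every -r/--remap flag in one consuming pass,
--     then take the last matching __node:= / __ns:= rule (last one wins)."""
--     values = []
--     it = iter(cmdline)
--     for tok in it:
--         if tok in ("-r", "--remap"):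
--             values.append(next(it, None))
--
--     def last_value(prefix):
--         for v in reversed(values):
--             if v is not None and v.startswith(prefix):
--                 return v[len(prefix):]
--         return None
--
--     return last_value("__node:="), last_value("__ns:=")
-- ===== Notes on version B (the rewrite author's own statement) =====
-- stated objective: alternative
-- what changed: Replaces the index-walking while loop with two special-case prefix branches inside it by a two-phase decomposition: one consuming pass collects every remap value token into a list, then each of (node, namespace) is extracted by a backward scan for the last matching prefix.
import Mathlib
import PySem

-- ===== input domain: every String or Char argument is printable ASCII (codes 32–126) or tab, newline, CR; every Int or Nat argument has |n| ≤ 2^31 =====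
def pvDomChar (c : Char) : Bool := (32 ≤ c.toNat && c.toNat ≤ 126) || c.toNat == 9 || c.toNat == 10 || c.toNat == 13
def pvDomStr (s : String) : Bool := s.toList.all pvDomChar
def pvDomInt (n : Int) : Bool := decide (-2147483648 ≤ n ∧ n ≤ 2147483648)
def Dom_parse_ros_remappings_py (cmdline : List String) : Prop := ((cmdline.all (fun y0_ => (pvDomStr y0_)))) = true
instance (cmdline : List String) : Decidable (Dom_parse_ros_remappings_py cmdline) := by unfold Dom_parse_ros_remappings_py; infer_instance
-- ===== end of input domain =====

-- B replaces A's indexed while-loop (with its two prefix branches inline) by a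
-- two-phase decomposition: collect all remap value tokens, then scan backwards
-- for the last matching prefix.  Objective: alternative decomposition, same cost.

-- ===== PORT A =====
-- the while loop of A: i is replaced by the suffix cmdline[i:], the two
-- accumulators node_name / namespace are threaded through
def goA : List String → Option String → Option String → Option String × Option String
  | [], node, ns => (node, ns)
  | [_], node, ns => (node, ns)  -- last token: even for "-r" the guard i+1 < len fails, i += 1 ends the loop
  | arg :: remap :: rest, node, ns =>
    if arg = "-r" ∨ arg = "--remap" then
      if PySem.Str.startswith remap "__node:=" then
        goA rest (some (PySem.Str.slice remap (some 8) none)) ns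
      else if PySem.Str.startswith remap "__ns:=" then
        goA rest node (some (PySem.Str.slice remap (some 6) none))
      else
        goA rest node ns
    else
      goA (remap :: rest) node ns

def parse_ros_remappings_py (cmdline : List String) : Option String × Option String :=
  goA cmdline none none

-- ===== PORT B =====
-- phase 1 of B: the consuming pass; next(it, None) at the end yields none
def collectB : List String → List (Option String)
  | [] => []
  | [tok] => if tok = "-r" ∨ tok = "--remap" then [none] else []
  | tok :: v :: rest =>
    if tok = "-r" ∨ tok = "--remap" then some v :: collectB rest
    else collectB (v :: rest)

-- phase 2 of B: the body of last_value, scanning the (already reversed) list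
def firstMatchB (p : String) : List (Option String) → Option String
  | [] => none
  | none :: rest => firstMatchB p rest
  | some v :: rest =>
    if PySem.Str.startswith v p then
      some (PySem.Str.slice v (some (p.length : Int)) none)
    else firstMatchB p rest

def parse_ros_remappings_py_alt (cmdline : List String) : Option String × Option String :=
  let values := collectB cmdline
  (firstMatchB "__node:=" values.reverse, firstMatchB "__ns:=" values.reverse)

-- ===== PRECONDITION & SPEC =====
def Spec_parse_ros_remappings_py (cmdline : List String) (out : Option String × Option String) : Prop := out = parse_ros_remappings_py_alt cmdline
instance (cmdline : List String) (out : Option String × Option String) : Decidable (Spec_parse_ros_remappings_py cmdline out) := by unfold Spec_parse_ros_remappings_py; infer_instance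

-- ===== CLAIM (what is proved, stated in full; the proofs are below) =====
def Claim_equal_parse_ros_remappings_py : Prop := ∀ (cmdline : List String), Dom_parse_ros_remappings_py cmdline → Spec_parse_ros_remappings_py cmdline (parse_ros_remappings_py cmdline)

-- ===== LEMMAS AND PROOFS =====

theorem firstMatchB_append (p : String) (xs ys : List (Option String)) :
    firstMatchB p (xs ++ ys) = (firstMatchB p xs).or (firstMatchB p ys) := by
  induction xs with
  | nil => simp [firstMatchB]
  | cons x xs ih =>
    match x with
    | none => simpa [firstMatchB] using ih
    | some v =>
      by_cases h : PySem.Chars.startswith v.toList p.toList = true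
      · simp [firstMatchB, h]
      · simp [firstMatchB, h, ih]

-- a string starting with "__node:=" does not start with "__ns:="
theorem not_both_prefixes (v : List Char)
    (h : PySem.Chars.startswith v ['_','_','n','o','d','e',':','='] = true) :
    PySem.Chars.startswith v ['_','_','n','s',':','='] = false := by
  rw [PySem.Chars.startswith_iff] at h
  by_contra hc
  rw [Bool.not_eq_false, PySem.Chars.startswith_iff] at hc
  rcases List.prefix_or_prefix_of_prefix h hc with h' | h'
  · exact absurd h' (by decide)
  · exact absurd h' (by decide)

theorem goA_eq (l : List String) (node ns : Option String) :
    goA l node ns =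
      ((firstMatchB "__node:=" (collectB l).reverse).or node,
       (firstMatchB "__ns:=" (collectB l).reverse).or ns) := by
  have hlen8 : (("__node:=".length : Int)) = 8 := by decide
  have hlen6 : (("__ns:=".length : Int)) = 6 := by decide
  match l with
  | [] => simp [goA, collectB, firstMatchB]
  | [tok] =>
    by_cases h : tok = "-r" ∨ tok = "--remap" <;>
      simp [goA, collectB, firstMatchB, h]
  | tok :: v :: rest =>
    by_cases h : tok = "-r" ∨ tok = "--remap"
    · by_cases h1 : PySem.Chars.startswith v.toList ['_','_','n','o','d','e',':','='] = true
      · have h2 := not_both_prefixes v.toList h1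
        simp [goA, collectB, firstMatchB_append, firstMatchB, h, h1, h2,
              goA_eq rest, hlen8]
      · by_cases h2 : PySem.Chars.startswith v.toList ['_','_','n','s',':','='] = true
        · simp [goA, collectB, firstMatchB_append, firstMatchB, h, h1, h2,
                goA_eq rest, hlen6]
        · simp [goA, collectB, firstMatchB_append, firstMatchB, h, h1, h2,
                goA_eq rest]
    · simp only [goA, collectB, if_neg h]
      exact goA_eq (v :: rest) node ns

-- ===== VERDICT (by name: the statement is the Claim_ definition above) =====
theorem parse_ros_remappings_py_spec : Claim_equal_parse_ros_remappings_py := by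
  intro cmdline _
  unfold Spec_parse_ros_remappings_py parse_ros_remappings_py parse_ros_remappings_py_alt
  simp [goA_eq]
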